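-- pv_equiv track=rewrite | github.com/Al-tekreeti/dataStructures_and_algorithms | sliding_window_techniques/contiguous_subarrays.py | getFruitBasketsWeight
-- ===== SOURCE A (Python) =====
-- def getFruitBasketsWeight(fruits):
--     """version1
--     """
--     w1 = 0
--     baskets = {}
--     for w2 in range(len(fruits)):
--         if fruits[w2] in baskets:
--             baskets[fruits[w2]] += 1
--         else:
--             baskets[fruits[w2]] = 1
--         while len(baskets) > 2:
--             baskets[fruits[w1]] -= 1
--             if baskets[fruits[w1]] == 0:
--                 baskets.pop(fruits[w1])
--             w1 += 1
--     return sum(baskets.values())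
-- ===== SOURCE B (Python) =====
-- def getFruitBasketsWeight(fruits):
--     """Length of the longest suffix of `fruits` with at most 2 distinct values:
--     scan backwards, stop at the first element that would introduce a 3rd distinct value."""
--     seen = set()
--     count = 0
--     for x in reversed(fruits):
--         if x not in seen:
--             if len(seen) == 2:
--                 break
--             seen.add(x)
--         count += 1
--     return count
-- ===== Notes on version B (the rewrite author's own statement) =====
-- stated objective: simpler
-- what changed: Replaces the forward two-pointer window with a counting dict by a single backward scan over a small set that counts the longest suffix with at most 2 distinct values, stopping at the first element that would add a third.
import Mathlib
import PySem

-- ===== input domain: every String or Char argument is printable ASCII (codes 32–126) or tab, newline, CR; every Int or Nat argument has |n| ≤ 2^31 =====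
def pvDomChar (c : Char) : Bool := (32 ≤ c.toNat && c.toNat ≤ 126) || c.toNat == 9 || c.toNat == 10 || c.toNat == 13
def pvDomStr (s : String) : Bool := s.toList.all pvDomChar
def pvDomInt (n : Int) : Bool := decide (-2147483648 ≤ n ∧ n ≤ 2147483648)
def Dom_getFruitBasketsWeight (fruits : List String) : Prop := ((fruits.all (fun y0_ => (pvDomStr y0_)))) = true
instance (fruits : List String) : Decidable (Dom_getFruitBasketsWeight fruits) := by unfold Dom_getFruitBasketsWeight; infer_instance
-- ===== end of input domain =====

-- B replaces A's forward two-pointer window with a counting dict by a single backward scan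
-- that counts the longest suffix with at most 2 distinct values (objective: simpler).


-- ===== PORT A =====
-- inner `while len(baskets) > 2:` loop; `fuel` is only a totality guard (the Python loop
-- terminates on every input; any fuel ≥ the window length gives the loop's exact result).
-- `baskets[fruits[w1]] -= 1` on an always-present key is `modify … 0 (· - 1)`.
def pvAShrink (fruits : List String) : Nat → Nat → PySem.Dict String Int → Nat × PySem.Dict String Int
  | 0, w1, b => (w1, b)
  | fuel + 1, w1, b =>
    if 2 < b.size then
      let f := PySem.List.pyGetD fruits (w1 : Int) ""   -- fruits[w1]; in range in every reachable state
      let b1 := b.modify f 0 (· - 1)                    -- baskets[fruits[w1]] -= 1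
      let b2 := if b1.getD f 0 = 0 then b1.erase f else b1   -- if … == 0: baskets.pop(fruits[w1])
      pvAShrink fruits fuel (w1 + 1) b2
    else (w1, b)

def getFruitBasketsWeight (fruits : List String) : Int :=
  let st := (PySem.List.pyRange 0 fruits.length 1).foldl
    (fun (st : Nat × PySem.Dict String Int) w2 =>
      let x := PySem.List.pyGetD fruits w2 ""           -- fruits[w2]
      let b := if st.2.contains x then st.2.modify x 0 (· + 1)   -- baskets[fruits[w2]] += 1
               else st.2.insert x 1                              -- baskets[fruits[w2]] = 1
      pvAShrink fruits fruits.length st.1 b)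
    (0, PySem.Dict.empty)
  st.2.values.sum                                       -- sum(baskets.values())

-- ===== PORT B =====
def pvBGo : List String → PySem.Set String → Int → Int
  | [], _, c => c
  | x :: xs, seen, c =>
    if seen.contains x then pvBGo xs seen (c + 1)
    else if seen.length = 2 then c                      -- break
    else pvBGo xs (seen.add x) (c + 1)

def getFruitBasketsWeight_alt (fruits : List String) : Int :=
  pvBGo fruits.reverse PySem.Set.empty 0

-- ===== PRECONDITION & SPEC =====
def Spec_getFruitBasketsWeight (fruits : List String) (out : Int) : Prop := out = getFruitBasketsWeight_alt fruits
instance (fruits : List String) (out : Int) : Decidable (Spec_getFruitBasketsWeight fruits out) := by unfold Spec_getFruitBasketsWeight; infer_instance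

-- ===== CLAIM (what is proved, stated in full; the proofs are below) =====
def Claim_equal_getFruitBasketsWeight : Prop := ∀ (fruits : List String), Dom_getFruitBasketsWeight fruits → Spec_getFruitBasketsWeight fruits (getFruitBasketsWeight fruits)

-- ===== LEMMAS AND PROOFS =====

-- distinct-value count of a list
def pvDcnt (l : List String) : Nat := l.toFinset.card

-- the baskets dict represents exactly the multiset of the current window W
def pvKeysOK (b : PySem.Dict String Int) (W : List String) : Prop :=
  b.keys.Nodup ∧ (∀ k, b.contains k = true ↔ k ∈ W) ∧ (∀ k, b.getD k 0 = (W.count k : Int))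

lemma pvSize_eq (b : PySem.Dict String Int) (W : List String) (h : pvKeysOK b W) :
    b.size = pvDcnt W := by
  obtain ⟨hnd, hmem, -⟩ := h
  have hkeys : b.keys.toFinset = W.toFinset := by
    ext k
    simp only [List.mem_toFinset, ← PySem.Dict.contains_iff_mem_keys, hmem]
  calc b.size = b.keys.length := by simp [PySem.Dict.size, PySem.Dict.keys]
    _ = b.keys.toFinset.card := (List.toFinset_card_of_nodup hnd).symm
    _ = W.toFinset.card := by rw [hkeys]

lemma pvValuesSum (b : PySem.Dict String Int) (W : List String) (h : pvKeysOK b W) :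
    b.values.sum = (W.length : Int) := by
  obtain ⟨hnd, hmem, hcnt⟩ := h
  have hkeys : b.keys.toFinset = W.toFinset := by
    ext k
    simp only [List.mem_toFinset, ← PySem.Dict.contains_iff_mem_keys, hmem]
  rw [PySem.Dict.values_eq_map_keys b hnd 0]
  have h1 : b.keys.map (fun k => b.getD k 0) = b.keys.map (fun k => ((W.count k : Nat) : Int)) := by
    simp only [hcnt]
  rw [h1, show (fun k => ((W.count k : Nat) : Int)) = ((Nat.cast : Nat → Int) ∘ (fun k => W.count k)) from rfl,
    ← List.map_map, ← Nat.cast_list_sum, ← List.sum_toFinset (fun k => W.count k) hnd, hkeys,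
    List.sum_toFinset_count_eq_length]

-- erase on a Dict, as needed here
lemma pvContains_erase_iff (d : PySem.Dict String Int) (f k : String) :
    (d.erase f).contains k = true ↔ (k ≠ f ∧ d.contains k = true) := by
  simp only [PySem.Dict.erase, PySem.Dict.contains, List.any_eq_true, List.mem_filter]
  constructor
  · rintro ⟨p, ⟨hp, hne⟩, hk⟩
    simp only [beq_iff_eq] at hk hne ⊢
    exact ⟨by simp at hne; simpa [hk] using hne, ⟨p, hp, by simp [hk]⟩⟩
  · rintro ⟨hne, p, hp, hk⟩
    simp only [beq_iff_eq] at hk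
    exact ⟨p, ⟨hp, by simp [hk, hne]⟩, by simp [hk]⟩

lemma pvKeys_erase (d : PySem.Dict String Int) (f : String) :
    (d.erase f).keys = d.keys.filter (fun a => !(a == f)) := by
  simp only [PySem.Dict.erase, PySem.Dict.keys]
  induction d.items with
  | nil => rfl
  | cons p t ih => by_cases h : p.1 = f <;> simp [h, ih]

lemma pvGet?_erase_of_ne (d : PySem.Dict String Int) (f k : String) (h : k ≠ f) :
    (d.erase f).get? k = d.get? k := by
  simp only [PySem.Dict.erase, PySem.Dict.get?]
  congr 1
  induction d.items with
  | nil => rfl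
  | cons p t ih =>
    by_cases h1 : p.1 = f
    · have hfk : (f == k) = false := beq_eq_false_iff_ne.mpr (fun e => h e.symm)
      simp [List.filter_cons, List.find?_cons, h1, hfk, ih]
    · by_cases h2 : p.1 = k
      · simp [List.filter_cons, List.find?_cons, h1, h2, h, ih]
      · simp [List.filter_cons, List.find?_cons, h1, h2, ih]

lemma pvKeysOK_erase (b : PySem.Dict String Int) (W : List String) (f : String)
    (hnd : b.keys.Nodup) (hmem : ∀ k, b.contains k = true ↔ (k ∈ W ∨ k = f))
    (hcnt : ∀ k, b.getD k 0 = (W.count k : Int)) (hf : f ∉ W) :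
    pvKeysOK (b.erase f) W := by
  refine ⟨?_, ?_, ?_⟩
  · rw [pvKeys_erase]; exact hnd.filter _
  · intro k
    rw [pvContains_erase_iff, hmem]
    constructor
    · rintro ⟨hne, hk | hk⟩
      · exact hk
      · exact absurd hk hne
    · intro hk
      exact ⟨fun he => hf (he ▸ hk), Or.inl hk⟩
  · intro k
    by_cases hk : k = f
    · subst hk
      have hc : (b.erase k).contains k = false := by
        by_contra h
        exact ((pvContains_erase_iff b k k).mp (by simpa using Bool.of_not_eq_false h)).1 rfl
      rw [PySem.Dict.getD_of_not_contains _ _ hc, List.count_eq_zero.mpr hf]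
      simp
    · have hck := hcnt k
      simp only [PySem.Dict.getD] at hck ⊢
      rw [pvGet?_erase_of_ne b f k hk]
      exact hck

-- `baskets[x] += 1` / `baskets[x] = 1` extends the represented window by x
lemma pvKeysOK_step (b : PySem.Dict String Int) (W : List String) (x : String) (h : pvKeysOK b W) :
    pvKeysOK (if b.contains x then b.modify x 0 (· + 1) else b.insert x 1) (W ++ [x]) := by
  obtain ⟨hnd, hmem, hcnt⟩ := h
  by_cases hc : b.contains x = true
  · rw [if_pos hc]
    refine ⟨?_, ?_, ?_⟩
    · simp only [PySem.Dict.modify]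
      exact PySem.Dict.nodup_keys_insert _ _ _ hnd
    · intro k
      rw [PySem.Dict.contains_modify]
      simp only [Bool.or_eq_true, beq_iff_eq, hmem, List.mem_append, List.mem_singleton]
      tauto
    · intro k
      rw [PySem.Dict.getD_modify]
      by_cases hk : k = x
      · simp only [hk, if_pos rfl, hcnt, List.count_append, List.count_cons, List.count_nil,
          beq_self_eq_true, if_pos rfl]
        push_cast; ring
      · rw [if_neg hk, hcnt k]
        have hxk : (x == k) = false := beq_eq_false_iff_ne.mpr (fun e => hk e.symm)
        simp [List.count_append, List.count_cons, hxk]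
  · rw [if_neg hc]
    have hx : x ∉ W := fun hw => hc ((hmem x).mpr hw)
    refine ⟨PySem.Dict.nodup_keys_insert _ _ _ hnd, ?_, ?_⟩
    · intro k
      rw [PySem.Dict.contains_insert]
      simp only [Bool.or_eq_true, beq_iff_eq, hmem, List.mem_append, List.mem_singleton]
      tauto
    · intro k
      rw [PySem.Dict.getD_insert]
      by_cases hk : k = x
      · simp [hk, List.count_append, List.count_eq_zero.mpr hx]
      · rw [if_neg hk, hcnt k]
        have hxk : (x == k) = false := beq_eq_false_iff_ne.mpr (fun e => hk e.symm)
        simp [List.count_append, List.count_cons, hxk]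

lemma pvShrink_spec (fruits P : List String) (hP : P <+: fruits) :
    ∀ (fuel w1 : Nat) (b : PySem.Dict String Int),
      w1 ≤ P.length → pvKeysOK b (P.drop w1) → (P.drop w1).length ≤ fuel →
      ∃ w1' b', pvAShrink fruits fuel w1 b = (w1', b') ∧ w1 ≤ w1' ∧ w1' ≤ P.length ∧
        pvKeysOK b' (P.drop w1') ∧ pvDcnt (P.drop w1') ≤ 2 ∧
        ∀ j, w1 ≤ j → j < w1' → 2 < pvDcnt (P.drop j) := by
  intro fuel
  induction fuel with
  | zero =>
    intro w1 b hw hK hlen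
    have hnil : P.drop w1 = [] := List.eq_nil_of_length_eq_zero (by omega)
    exact ⟨w1, b, rfl, le_refl _, hw, hK, by simp [pvDcnt, hnil], by omega⟩
  | succ fuel ih =>
    intro w1 b hw hK hlen
    have hsz := pvSize_eq b _ hK
    by_cases hs : 2 < b.size
    · have hlt : w1 < P.length := by
        by_contra hcon
        push_neg at hcon
        rw [List.drop_eq_nil_of_le hcon] at hsz
        simp [pvDcnt] at hsz
        omega
      have hf : PySem.List.pyGetD fruits (w1 : Int) "" = P[w1] := by
        rw [PySem.List.pyGetD_natCast,
          List.getD_eq_getElem fruits "" (Nat.lt_of_lt_of_le hlt hP.length_le)]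
        exact (List.IsPrefix.getElem hP hlt).symm
      have hdrop : P.drop w1 = P[w1] :: P.drop (w1 + 1) := List.drop_eq_getElem_cons hlt
      obtain ⟨hnd, hmem, hcnt⟩ := hK
      set f := P[w1] with hfdef
      set W' := P.drop (w1 + 1) with hW'
      -- properties of b1 = b.modify f 0 (· - 1)
      have hnd1 : (b.modify f 0 (· - 1)).keys.Nodup := by
        simp only [PySem.Dict.modify]
        exact PySem.Dict.nodup_keys_insert _ _ _ hnd
      have hmem1 : ∀ k, (b.modify f 0 (· - 1)).contains k = true ↔ (k ∈ W' ∨ k = f) := by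
        intro k
        rw [PySem.Dict.contains_modify]
        simp only [Bool.or_eq_true, beq_iff_eq, hmem, hdrop, List.mem_cons]
        tauto
      have hcnt1 : ∀ k, (b.modify f 0 (· - 1)).getD k 0 = (W'.count k : Int) := by
        intro k
        rw [PySem.Dict.getD_modify]
        by_cases hk : k = f
        · simp only [hk, if_pos rfl, hcnt, hdrop, List.count_cons, beq_self_eq_true, if_pos rfl]
          push_cast; ring
        · rw [if_neg hk, hcnt k, hdrop]
          have hfk : (f == k) = false := beq_eq_false_iff_ne.mpr (fun e => hk e.symm)
          simp [List.count_cons, hfk]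
      -- b2 represents W'
      have hK2 : pvKeysOK
          (if (b.modify f 0 (· - 1)).getD f 0 = 0 then (b.modify f 0 (· - 1)).erase f
           else b.modify f 0 (· - 1)) W' := by
        by_cases hz : (b.modify f 0 (· - 1)).getD f 0 = 0
        · rw [if_pos hz]
          have hfW' : f ∉ W' := by
            rw [hcnt1 f] at hz
            exact List.count_eq_zero.mp (by exact_mod_cast hz)
          exact pvKeysOK_erase _ _ _ hnd1 hmem1 hcnt1 hfW'
        · rw [if_neg hz]
          have hfW' : f ∈ W' := by
            rw [hcnt1 f] at hz
            have : W'.count f ≠ 0 := fun h0 => hz (by exact_mod_cast h0)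
            exact List.count_pos_iff.mp (Nat.pos_of_ne_zero this)
          refine ⟨hnd1, fun k => ?_, hcnt1⟩
          rw [hmem1 k]
          constructor
          · rintro (hk | hk)
            · exact hk
            · exact hk ▸ hfW'
          · exact Or.inl
      have hlen2 : W'.length ≤ fuel := by
        have := congrArg List.length hdrop
        simp only [List.length_cons] at this
        omega
      obtain ⟨w1', b', heq, hge, hle', hK', hd', hmin'⟩ :=
        ih (w1 + 1) _ hlt hK2 hlen2
      refine ⟨w1', b', ?_, by omega, hle', hK', hd', ?_⟩
      · simp only [pvAShrink, if_pos hs, hf]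
        exact heq
      · intro j hj1 hj2
        rcases Nat.eq_or_lt_of_le hj1 with hj | hj
        · rw [← hj]; omega
        · exact hmin' j hj hj2
    · refine ⟨w1, b, ?_, le_refl _, hw, hK, by omega, by omega⟩
      simp [pvAShrink, hs]

def pvInv (P : List String) (st : Nat × PySem.Dict String Int) : Prop :=
  st.1 ≤ P.length ∧ pvKeysOK st.2 (P.drop st.1) ∧ pvDcnt (P.drop st.1) ≤ 2 ∧
    ∀ j, j < st.1 → 2 < pvDcnt (P.drop j)

lemma pvDcnt_append_le (W : List String) (x : String) : pvDcnt W ≤ pvDcnt (W ++ [x]) := by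
  apply Finset.card_le_card
  intro a ha
  simp only [List.toFinset_append, Finset.mem_union]
  exact Or.inl ha

lemma pvLoop_spec (fruits : List String) :
    ∀ (l P : List String) (st : Nat × PySem.Dict String Int), P ++ l <+: fruits → pvInv P st →
      pvInv (P ++ l)
        (l.foldl (fun st x =>
          pvAShrink fruits fruits.length st.1
            (if st.2.contains x then st.2.modify x 0 (· + 1) else st.2.insert x 1)) st) := by
  intro l
  induction l with
  | nil => intro P st hpre hinv; simpa using hinv
  | cons x t ih =>
    intro P st hpre hinv
    obtain ⟨hw, hK, hd, hmin⟩ := hinv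
    have hpre' : (P ++ [x]) ++ t <+: fruits := by
      rwa [List.append_cons] at hpre
    have hpfx : P ++ [x] <+: fruits :=
      List.IsPrefix.trans (List.prefix_append _ _) hpre'
    have hdrop : (P ++ [x]).drop st.1 = P.drop st.1 ++ [x] :=
      List.drop_append_of_le_length hw
    have hK2 : pvKeysOK (if st.2.contains x then st.2.modify x 0 (· + 1) else st.2.insert x 1)
        ((P ++ [x]).drop st.1) := by
      rw [hdrop]
      exact pvKeysOK_step _ _ _ hK
    obtain ⟨w1', b', heq, hge, hle', hK', hd', hmin'⟩ :=
      pvShrink_spec fruits (P ++ [x]) hpfx fruits.length st.1 _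
        (by simpa using Nat.le_trans hw (by simp))
        hK2
        (Nat.le_trans (by rw [List.length_drop]; exact Nat.sub_le _ _) hpfx.length_le)
    have hinv' : pvInv (P ++ [x]) (w1', b') := by
      refine ⟨hle', hK', hd', ?_⟩
      intro j hj
      by_cases hjw : j < st.1
      · have hjP : (P ++ [x]).drop j = P.drop j ++ [x] :=
          List.drop_append_of_le_length (by omega)
        rw [hjP]
        exact Nat.lt_of_lt_of_le (hmin j hjw) (pvDcnt_append_le _ _)
      · exact hmin' j (by omega) hj
    have := ih (P ++ [x]) (w1', b') hpre' hinv'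
    rw [← List.append_cons] at this
    simpa [List.foldl_cons, heq] using this

-- A computes n - w1 for the minimal w1 whose suffix has ≤ 2 distinct values
lemma pvA_char (fruits : List String) :
    ∃ w1, w1 ≤ fruits.length ∧ pvDcnt (fruits.drop w1) ≤ 2 ∧
      (∀ j, j < w1 → 2 < pvDcnt (fruits.drop j)) ∧
      getFruitBasketsWeight fruits = ((fruits.length - w1 : Nat) : Int) := by
  have hrw : getFruitBasketsWeight fruits =
      (fruits.foldl (fun st x =>
          pvAShrink fruits fruits.length st.1
            (if st.2.contains x then st.2.modify x 0 (· + 1) else st.2.insert x 1))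
        (0, PySem.Dict.empty)).2.values.sum := by
    unfold getFruitBasketsWeight
    exact congrArg (fun st => st.2.values.sum)
      (PySem.List.foldl_pyRange_zero_pyGetD' fruits ""
        (fun st x =>
          pvAShrink fruits fruits.length st.1
            (if st.2.contains x then st.2.modify x 0 (· + 1) else st.2.insert x 1))
        (0, PySem.Dict.empty))
  have hbase : pvInv [] ((0 : Nat), (PySem.Dict.empty : PySem.Dict String Int)) := by
    refine ⟨by simp, ⟨by simp [PySem.Dict.keys, PySem.Dict.empty], fun k => by
        simp [PySem.Dict.contains_empty], fun k => by simp [PySem.Dict.getD_empty]⟩,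
      by simp [pvDcnt], by omega⟩
  have hinv := pvLoop_spec fruits fruits [] (0, PySem.Dict.empty) (by simp) hbase
  simp only [List.nil_append] at hinv
  obtain ⟨hw, hK, hd, hmin⟩ := hinv
  set st := fruits.foldl (fun st x =>
          pvAShrink fruits fruits.length st.1
            (if st.2.contains x then st.2.modify x 0 (· + 1) else st.2.insert x 1))
        (0, PySem.Dict.empty) with hst
  refine ⟨st.1, hw, hd, hmin, ?_⟩
  rw [hrw, pvValuesSum st.2 _ hK, List.length_drop]

-- greedy length taken by B's backward scan, abstracted to a Finset of seen values
def pvGlen : List String → Finset String → Nat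
  | [], _ => 0
  | x :: xs, s =>
    if x ∈ s then pvGlen xs s + 1
    else if s.card = 2 then 0
    else pvGlen xs (insert x s) + 1

lemma pvBGo_eq_glen : ∀ (r : List String) (seen : PySem.Set String) (c : Int),
    List.Nodup seen → pvBGo r seen c = c + (pvGlen r seen.toFinset : Int) := by
  intro r
  induction r with
  | nil => intro seen c hnd; simp [pvBGo, pvGlen]
  | cons x xs ih =>
    intro seen c hnd
    by_cases hx : x ∈ seen
    · have hc : seen.contains x = true := by simp [List.contains_eq_mem, hx]
      have e1 : pvBGo (x :: xs) seen c = pvBGo xs seen (c + 1) := by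
        simp only [pvBGo]; rw [hc]; simp
      have e2 : pvGlen (x :: xs) seen.toFinset = pvGlen xs seen.toFinset + 1 := by
        simp only [pvGlen]; rw [if_pos (List.mem_toFinset.mpr hx)]
      rw [e1, ih seen _ hnd, e2]; push_cast; ring
    · have hc : seen.contains x = false := by simp [List.contains_eq_mem, hx]
      have hxs : x ∉ seen.toFinset := fun h => hx (List.mem_toFinset.mp h)
      have hcard : seen.toFinset.card = seen.length := List.toFinset_card_of_nodup hnd
      by_cases h2 : List.length seen = 2
      · have e1 : pvBGo (x :: xs) seen c = c := by
          simp only [pvBGo]; rw [hc]; simp [h2]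
        have e2 : pvGlen (x :: xs) seen.toFinset = 0 := by
          simp only [pvGlen]; rw [if_neg hxs, if_pos (by rw [hcard, h2])]
        rw [e1, e2]; simp
      · have hadd : seen.add x = seen ++ [x] := by
          unfold PySem.Set.add; rw [hc]; simp
        have hndadd : List.Nodup (seen.add x) := by
          rw [hadd]
          exact List.Nodup.append hnd (List.nodup_singleton x)
            (List.disjoint_singleton.mpr hx)
        have htf : (seen.add x).toFinset = insert x seen.toFinset := by
          rw [hadd]; ext a; simp [List.mem_toFinset, or_comm]
        have e1 : pvBGo (x :: xs) seen c = pvBGo xs (seen.add x) (c + 1) := by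
          simp only [pvBGo]; rw [hc]; simp [h2]
        have e2 : pvGlen (x :: xs) seen.toFinset = pvGlen xs (insert x seen.toFinset) + 1 := by
          simp only [pvGlen]; rw [if_neg hxs, if_neg (by rw [hcard]; exact h2)]
        rw [e1, ih _ _ hndadd, htf, e2]; push_cast; ring

lemma pvGlen_le : ∀ (r : List String) (s : Finset String), pvGlen r s ≤ r.length := by
  intro r
  induction r with
  | nil => intro s; simp [pvGlen]
  | cons x xs ih =>
    intro s
    simp only [pvGlen, List.length_cons]
    split_ifs with h1 h2
    · exact Nat.succ_le_succ (ih s)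
    · omega
    · exact Nat.succ_le_succ (ih _)

lemma pvGlen_take_le : ∀ (r : List String) (s : Finset String), s.card ≤ 2 →
    ((r.take (pvGlen r s)).toFinset ∪ s).card ≤ 2 := by
  intro r
  induction r with
  | nil => intro s hs; simpa using hs
  | cons x xs ih =>
    intro s hs
    by_cases h1 : x ∈ s
    · rw [show pvGlen (x :: xs) s = pvGlen xs s + 1 from by simp [pvGlen, h1],
        List.take_succ_cons, List.toFinset_cons]
      rw [Finset.insert_union, Finset.insert_eq_self.mpr (Finset.mem_union_right _ h1)]
      exact ih s hs
    · by_cases h2 : s.card = 2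
      · rw [show pvGlen (x :: xs) s = 0 from by simp [pvGlen, h1, h2]]
        simpa [h2] using le_refl 2
      · rw [show pvGlen (x :: xs) s = pvGlen xs (insert x s) + 1 from by
          simp [pvGlen, h1, h2], List.take_succ_cons, List.toFinset_cons]
        rw [Finset.insert_union, show insert x ((xs.take (pvGlen xs (insert x s))).toFinset ∪ s)
          = (xs.take (pvGlen xs (insert x s))).toFinset ∪ insert x s from by
            rw [Finset.union_insert]]
        exact ih (insert x s) (by rw [Finset.card_insert_of_notMem h1]; omega)

lemma pvGlen_take_gt : ∀ (r : List String) (s : Finset String), s.card ≤ 2 →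
    pvGlen r s < r.length → 2 < ((r.take (pvGlen r s + 1)).toFinset ∪ s).card := by
  intro r
  induction r with
  | nil => intro s hs h; simp at h
  | cons x xs ih =>
    intro s hs h
    by_cases h1 : x ∈ s
    · rw [show pvGlen (x :: xs) s = pvGlen xs s + 1 from by simp [pvGlen, h1]] at h ⊢
      rw [List.take_succ_cons, List.toFinset_cons, Finset.insert_union,
        Finset.insert_eq_self.mpr (Finset.mem_union_right _ h1)]
      exact ih s hs (by simpa using Nat.lt_of_succ_lt_succ h)
    · by_cases h2 : s.card = 2
      · rw [show pvGlen (x :: xs) s = 0 from by simp [pvGlen, h1, h2]]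
        rw [List.take_succ_cons, List.take_zero, List.toFinset_cons, List.toFinset_nil,
          Finset.insert_union, Finset.empty_union, Finset.card_insert_of_notMem h1, h2]
        omega
      · rw [show pvGlen (x :: xs) s = pvGlen xs (insert x s) + 1 from by
          simp [pvGlen, h1, h2]] at h ⊢
        rw [List.take_succ_cons, List.toFinset_cons, Finset.insert_union, ← Finset.union_insert]
        exact ih (insert x s) (by rw [Finset.card_insert_of_notMem h1]; omega)
          (by simpa using Nat.lt_of_succ_lt_succ h)

lemma pvTakeFinsetMono (r : List String) (a b : Nat) (hab : a ≤ b) :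
    (r.take a).toFinset ⊆ (r.take b).toFinset := by
  intro x hx
  simp only [List.mem_toFinset] at *
  have h : r.take a = (r.take b).take a := by rw [List.take_take, min_eq_left hab]
  rw [h] at hx
  exact List.take_subset _ _ hx

lemma pvB_char (fruits : List String) :
    ∃ w1, w1 ≤ fruits.length ∧ pvDcnt (fruits.drop w1) ≤ 2 ∧
      (∀ j, j < w1 → 2 < pvDcnt (fruits.drop j)) ∧
      getFruitBasketsWeight_alt fruits = ((fruits.length - w1 : Nat) : Int) := by
  set r := fruits.reverse with hr
  set g := pvGlen r ∅ with hg
  set n := fruits.length with hn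
  have hrlen : r.length = n := by simp [hr, hn]
  have hgle : g ≤ n := hrlen ▸ pvGlen_le r ∅
  have hdropfin : ∀ j : Nat, j ≤ n → (fruits.drop j).toFinset = (r.take (n - j)).toFinset := by
    intro j hj
    rw [← List.toFinset_reverse, List.reverse_drop]
  refine ⟨n - g, by omega, ?_, ?_, ?_⟩
  · rw [pvDcnt, hdropfin (n - g) (by omega), show n - (n - g) = g from by omega]
    have := pvGlen_take_le r ∅ (by simp)
    simpa using this
  · intro j hj
    have hglt : g < r.length := by omega
    have h1 : 2 < ((r.take (g + 1)).toFinset).card := by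
      have := pvGlen_take_gt r ∅ (by simp) hglt
      simpa using this
    rw [pvDcnt, hdropfin j (by omega)]
    exact Nat.lt_of_lt_of_le h1
      (Finset.card_le_card (pvTakeFinsetMono r (g + 1) (n - j) (by omega)))
  · unfold getFruitBasketsWeight_alt
    rw [pvBGo_eq_glen r PySem.Set.empty 0 (by simp [PySem.Set.empty])]
    simp only [PySem.Set.empty, List.toFinset_nil, ← hg]
    rw [show n - (n - g) = g from by omega]
    simp

-- ===== VERDICT (by name: the statement is the Claim_ definition above) =====
theorem getFruitBasketsWeight_spec : Claim_equal_getFruitBasketsWeight := by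
  intro fruits _
  unfold Spec_getFruitBasketsWeight
  obtain ⟨w1, hw1, hle, hmin, hA⟩ := pvA_char fruits
  obtain ⟨w2, hw2, hle2, hmin2, hB⟩ := pvB_char fruits
  have hw : w1 = w2 := by
    rcases Nat.lt_trichotomy w1 w2 with h | h | h
    · have := hmin2 w1 h; omega
    · exact h
    · have := hmin w2 h; omega
  rw [hA, hB, hw]
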